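-- pv_equiv track=rewrite | github.com/mocatfrio/kmppti | kmppti/kmppti/skyline.py | calculate_dominance_boundary
-- ===== SOURCE A (Python) =====
-- DIFF = 1
--
-- def calculate_dominance_boundary(c_val, result):
--     dominance_boundary = []
--     if result:
--         for i in range(len(c_val)):
--             values = [val[i] for val in [res[DIFF] for res in result]]
--             min_val = min(values)
--             dominance_boundary.append(result[values.index(min_val)][DIFF])
--     return dominance_boundary
-- ===== SOURCE B (Python) =====
-- DIFF = 1
--
-- def calculate_dominance_boundary(c_val, result):
--     # Single sweep over the result rows maintaining per-dimension running (min, argmin vector).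
--     if not result or not c_val:
--         return []
--     d = len(c_val)
--     best_val = [None] * d
--     best_vec = [None] * d
--     for res in result:
--         vec = res[DIFF]
--         for i in range(d):
--             if best_val[i] is None or vec[i] < best_val[i]:
--                 best_val[i] = vec[i]
--                 best_vec[i] = vec
--     return best_vec
-- ===== Notes on version B (the rewrite author's own statement) =====
-- stated objective: alternative
-- what changed: Replaces A's per-dimension column build + min() + .index() scans by a single sweep over the result rows that maintains per-dimension running (minimum, argmin DIFF-vector) state, with strict < so the first-seen minimum row is kept.
import Mathlib
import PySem

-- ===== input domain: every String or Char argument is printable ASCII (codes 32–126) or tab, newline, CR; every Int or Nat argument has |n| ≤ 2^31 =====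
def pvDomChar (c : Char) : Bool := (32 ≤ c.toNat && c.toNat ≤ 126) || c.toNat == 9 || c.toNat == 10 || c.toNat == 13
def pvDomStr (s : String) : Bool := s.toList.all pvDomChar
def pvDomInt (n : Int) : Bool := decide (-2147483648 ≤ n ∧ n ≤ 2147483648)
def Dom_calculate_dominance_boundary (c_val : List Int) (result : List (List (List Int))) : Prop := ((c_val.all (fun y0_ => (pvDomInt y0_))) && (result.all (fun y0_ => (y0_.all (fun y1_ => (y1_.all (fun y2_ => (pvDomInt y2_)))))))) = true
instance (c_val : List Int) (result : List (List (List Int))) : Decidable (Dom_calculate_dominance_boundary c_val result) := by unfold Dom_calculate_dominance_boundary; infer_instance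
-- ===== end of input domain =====

-- B replaces A's per-dimension min/.index scans by one sweep over the rows maintaining a
-- per-dimension running (minimum, argmin-vector) state (objective: alternative decomposition).


-- ===== PORT A =====
-- loop body of A (values / min_val / idx / append, exactly as in the Python);
-- res[DIFF] / val[i]: pyGet? with .getD — in range whenever the Python does not raise (Pre_).
def pvEntryAFun (result : List (List (List Int))) (i : Int) : List Int :=
  let values := (result.map (fun res => (PySem.List.pyGet? res 1).getD [])).map
    (fun val => (PySem.List.pyGet? val i).getD 0)
  let min_val := (PySem.List.min? values (fun x => x)).getD 0
  let idx := (PySem.List.index? values min_val).getD 0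
  (PySem.List.pyGet? ((PySem.List.pyGet? result (idx : Int)).getD []) 1).getD []

def calculate_dominance_boundary (c_val : List Int) (result : List (List (List Int))) : List (List Int) :=
  if result ≠ [] then
    (List.range c_val.length).foldl
      (fun db (i : Nat) => db ++ [pvEntryAFun result (i : Int)]) []
  else []

-- ===== PORT B =====
-- inner per-dimension update of (best_val, best_vec) at index i (i < d always in B's loop,
-- so getD/set are exact for the Python reads/writes best_val[i], best_vec[i])
def pvInner (vec : List Int) (st : List (Option Int) × List (List Int)) (i : Nat) :
    List (Option Int) × List (List Int) :=
  match st.1.getD i none with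
  | none => (st.1.set i (some ((PySem.List.pyGet? vec (i : Int)).getD 0)), st.2.set i vec)
  | some m =>
    if (PySem.List.pyGet? vec (i : Int)).getD 0 < m then
      (st.1.set i (some ((PySem.List.pyGet? vec (i : Int)).getD 0)), st.2.set i vec)
    else st

-- one row of B's sweep: vec = res[DIFF]; for i in range(d): update
def pvRow (d : Nat) (st : List (Option Int) × List (List Int)) (res : List (List Int)) :
    List (Option Int) × List (List Int) :=
  let vec := (PySem.List.pyGet? res 1).getD []
  (List.range d).foldl (pvInner vec) st

def calculate_dominance_boundary_alt (c_val : List Int) (result : List (List (List Int))) : List (List Int) :=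
  if result = [] ∨ c_val = [] then []
  else
    let d := c_val.length
    (result.foldl (pvRow d) (List.replicate d none, List.replicate d [])).2

-- ===== PRECONDITION & SPEC =====
-- Pre_ excludes exactly the inputs where Python A raises IndexError: when c_val is nonempty,
-- every row needs res[1] to exist and be at least as long as c_val.
def Pre_calculate_dominance_boundary (c_val : List Int) (result : List (List (List Int))) : Prop :=
  c_val = [] ∨ ∀ res ∈ result, 2 ≤ res.length ∧ c_val.length ≤ (res.getD 1 []).length

instance (c_val : List Int) (result : List (List (List Int))) : Decidable (Pre_calculate_dominance_boundary c_val result) := by unfold Pre_calculate_dominance_boundary; infer_instance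

def pvWitness_calculate_dominance_boundary : List Int × List (List (List Int)) :=
  ([1, 2], [[[0, 0], [3, 4]], [[0], [1, 5]]])

def Spec_calculate_dominance_boundary (c_val : List Int) (result : List (List (List Int))) (out : List (List Int)) : Prop := out = calculate_dominance_boundary_alt c_val result
instance (c_val : List Int) (result : List (List (List Int))) (out : List (List Int)) : Decidable (Spec_calculate_dominance_boundary c_val result out) := by unfold Spec_calculate_dominance_boundary; infer_instance

-- ===== CLAIM (what is proved, stated in full; the proofs are below) =====
def Claim_equal_calculate_dominance_boundary : Prop := ∀ (c_val : List Int) (result : List (List (List Int))), Dom_calculate_dominance_boundary c_val result → Pre_calculate_dominance_boundary c_val result → Spec_calculate_dominance_boundary c_val result (calculate_dominance_boundary c_val result)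

-- ===== LEMMAS AND PROOFS =====

-- value of a vector at dimension i, as both ports compute it
def pvG (i : Int) (v : List Int) : Int := (PySem.List.pyGet? v i).getD 0

-- first minimum of column i together with the row achieving it
def pvFM (i : Int) : List (List Int) → Int × List Int
  | [] => (0, [])
  | [v] => (pvG i v, v)
  | v :: r :: rs => if pvG i v ≤ (pvFM i (r :: rs)).1 then (pvG i v, v) else pvFM i (r :: rs)

-- per-dimension functional version of B's update
def pvUpd (i : Int) (b : Option Int × List Int) (v : List Int) : Option Int × List Int :=
  match b.1 with
  | none => (some (pvG i v), v)
  | some m => if pvG i v < m then (some (pvG i v), v) else b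

def pvVec (res : List (List Int)) : List Int := (PySem.List.pyGet? res 1).getD []

theorem pvFM_cons (i : Int) (v r : List Int) (rs : List (List Int)) :
    pvFM i (v :: r :: rs) =
      if pvG i v ≤ (pvFM i (r :: rs)).1 then (pvG i v, v) else pvFM i (r :: rs) := rfl

theorem pvFM_cons_fst (i : Int) (v r : List Int) (rs : List (List Int)) :
    (pvFM i (v :: r :: rs)).1 = min (pvG i v) (pvFM i (r :: rs)).1 := by
  rw [pvFM_cons]
  by_cases h : pvG i v ≤ (pvFM i (r :: rs)).1
  · rw [if_pos h]; exact (min_eq_left h).symm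
  · rw [if_neg h]; exact (min_eq_right (le_of_not_ge h)).symm

theorem pvFold_min (i : Int) (rs : List (List Int)) (h : rs ≠ []) :
    ∀ a : Int, (rs.map (pvG i)).foldl min a = min a (pvFM i rs).1 := by
  induction rs with
  | nil => simp at h
  | cons v t ih =>
    intro a
    cases t with
    | nil => simp [pvFM]
    | cons r rs' =>
      rw [List.map_cons, List.foldl_cons, ih (by simp) (min a (pvG i v)),
        pvFM_cons_fst, min_assoc]

theorem pvMin?_eq (i : Int) (rows : List (List Int)) (h : rows ≠ []) :
    PySem.List.min? (rows.map (pvG i)) (fun x => x) = some (pvFM i rows).1 := by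
  cases rows with
  | nil => simp at h
  | cons v t =>
    rw [List.map_cons, PySem.List.min?_id_cons]
    cases t with
    | nil => simp [pvFM]
    | cons r rs' =>
      rw [pvFold_min i (r :: rs') (by simp), pvFM_cons_fst]

theorem pvIndex_eq (i : Int) (rows : List (List Int)) (h : rows ≠ []) :
    ∃ k, PySem.List.index? (rows.map (pvG i)) (pvFM i rows).1 = some k ∧
      rows[k]? = some (pvFM i rows).2 := by
  induction rows with
  | nil => simp at h
  | cons v t ih =>
    cases t with
    | nil =>
      exact ⟨0, by simp [pvFM], by simp [pvFM]⟩
    | cons r rs' =>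
      by_cases hc : pvG i v ≤ (pvFM i (r :: rs')).1
      · refine ⟨0, ?_, by simp [pvFM_cons, if_pos hc]⟩
        rw [pvFM_cons, if_pos hc, List.map_cons]
        exact PySem.List.index?_cons_self _ _
      · obtain ⟨k, hk1, hk2⟩ := ih (by simp)
        refine ⟨k + 1, ?_, ?_⟩
        · have hne : pvG i v ≠ (pvFM i (r :: rs')).1 := by omega
          rw [pvFM_cons, if_neg hc, List.map_cons, PySem.List.index?_cons_of_ne _ hne, hk1]
          rfl
        · rw [pvFM_cons, if_neg hc]; simpa using hk2

-- A's entry for dimension i is the first-argmin row of column i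
theorem pvEntryA (i : Int) (result : List (List (List Int))) (h : result ≠ []) :
    pvEntryAFun result i = (pvFM i (result.map pvVec)).2 := by
  have hrows : result.map pvVec ≠ [] := by simpa using h
  unfold pvEntryAFun
  have hmap : (result.map (fun res => (PySem.List.pyGet? res 1).getD [])).map
      (fun val => (PySem.List.pyGet? val i).getD 0) = (result.map pvVec).map (pvG i) := by
    simp [pvVec, pvG]
  simp only [hmap]
  rw [pvMin?_eq i _ hrows]
  obtain ⟨k, hk1, hk2⟩ := pvIndex_eq i (result.map pvVec) hrows
  simp only [Option.getD_some, hk1]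
  obtain ⟨hklt', hval⟩ := List.getElem?_eq_some_iff.mp hk2
  have hklt : k < result.length := by simpa using hklt'
  rw [PySem.List.pyGet?_natCast]
  have hget : result[k]? = some result[k] := List.getElem?_eq_getElem hklt
  rw [hget]
  simp only [List.getElem_map] at hval
  simpa [pvVec] using hval

-- fold of the per-dimension update from a seeded state
theorem pvUpd_fold (i : Int) (rs : List (List Int)) :
    ∀ m (w : List Int), rs.foldl (pvUpd i) (some m, w) =
      if rs = [] then (some m, w)
      else if (pvFM i rs).1 < m then (some (pvFM i rs).1, (pvFM i rs).2) else (some m, w) := by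
  induction rs with
  | nil => simp
  | cons v t ih =>
    intro m w
    have hstep : pvUpd i (some m, w) v =
        if pvG i v < m then (some (pvG i v), v) else (some m, w) := rfl
    rw [List.foldl_cons, hstep]
    cases t with
    | nil =>
      simp only [List.foldl_nil, reduceCtorEq, if_false, pvFM]
    | cons r rs' =>
      by_cases h1 : pvG i v < m
      · rw [if_pos h1, ih (pvG i v) v]
        simp only [reduceCtorEq, if_false, pvFM_cons]
        by_cases h2 : pvG i v ≤ (pvFM i (r :: rs')).1
        · rw [if_pos h2]
          split_ifs <;> first | rfl | omega
        · rw [if_neg h2]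
          split_ifs <;> first | rfl | omega
      · rw [if_neg h1, ih m w]
        simp only [reduceCtorEq, if_false, pvFM_cons]
        by_cases h2 : pvG i v ≤ (pvFM i (r :: rs')).1
        · rw [if_pos h2]
          split_ifs <;> first | rfl | omega
        · rw [if_neg h2]

theorem pvUpd_fold_none (i : Int) (rows : List (List Int)) (h : rows ≠ []) :
    rows.foldl (pvUpd i) (none, []) = (some (pvFM i rows).1, (pvFM i rows).2) := by
  cases rows with
  | nil => simp at h
  | cons v t =>
    rw [List.foldl_cons]
    have hfirst : pvUpd i (none, []) v = (some (pvG i v), v) := rfl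
    rw [hfirst, pvUpd_fold]
    cases t with
    | nil => simp [pvFM]
    | cons r rs' =>
      simp only [reduceCtorEq, if_false, pvFM_cons]
      by_cases h2 : pvG i v ≤ (pvFM i (r :: rs')).1
      · rw [if_pos h2]
        split_ifs <;> first | rfl | omega
      · rw [if_neg h2]
        split_ifs <;> first | rfl | omega

-- one pvInner pass over range d: lengths are preserved and entry i is updated by pvUpd
theorem pvInner_foldRange (vec : List Int) (d : Nat) :
    ∀ (k : Nat) (st : List (Option Int) × List (List Int)),
      st.1.length = d → st.2.length = d →
      (((List.range k).foldl (pvInner vec) st).1.length = d ∧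
       ((List.range k).foldl (pvInner vec) st).2.length = d) ∧
      ∀ i : Nat, i < d →
        ((((List.range k).foldl (pvInner vec) st).1.getD i none,
          ((List.range k).foldl (pvInner vec) st).2.getD i []) =
          if i < k then pvUpd (i : Int) (st.1.getD i none, st.2.getD i []) vec
          else (st.1.getD i none, st.2.getD i [])) := by
  intro k
  induction k with
  | zero => intro st h1 h2; simp [h1, h2]
  | succ k ih =>
    intro st h1 h2
    rw [List.range_succ, List.foldl_append, List.foldl_cons, List.foldl_nil]
    obtain ⟨⟨hl1, hl2⟩, hent⟩ := ih st h1 h2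
    set st' := (List.range k).foldl (pvInner vec) st with hst'
    have hlen : (pvInner vec st' k).1.length = d ∧ (pvInner vec st' k).2.length = d := by
      unfold pvInner
      split <;> [skip; split] <;> simp [hl1, hl2]
    refine ⟨hlen, ?_⟩
    intro i hi
    by_cases hik : i = k
    · subst hik
      have hme := hent i hi
      rw [if_neg (by omega)] at hme
      have hgd1 : st'.1.getD i none = st.1.getD i none := congrArg Prod.fst hme
      have hgd2 : st'.2.getD i [] = st.2.getD i [] := congrArg Prod.snd hme
      unfold pvInner pvUpd
      rw [hgd1]
      have hset1 : ∀ x : Option Int, (st'.1.set i x).getD i none = x := by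
        intro x
        simp [List.getD_eq_getElem?_getD, List.getElem?_set_self (by omega : i < st'.1.length)]
      have hset2 : ∀ x : List Int, (st'.2.set i x).getD i [] = x := by
        intro x
        simp [List.getD_eq_getElem?_getD, List.getElem?_set_self (by omega : i < st'.2.length)]
      rw [if_pos (by omega : i < i + 1)]
      cases hm : st.1.getD i none with
      | none =>
        dsimp only
        simp only [pvG]
        exact Prod.ext (hset1 _) (hset2 _)
      | some m =>
        dsimp only
        simp only [pvG]
        split_ifs with hlt
        · exact Prod.ext (hset1 _) (hset2 _)
        · rw [hme, hm]
    · have hne : (i : Nat) ≠ k := hik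
      have hstep : ((pvInner vec st' k).1.getD i none, (pvInner vec st' k).2.getD i []) =
          (st'.1.getD i none, st'.2.getD i []) := by
        unfold pvInner
        split <;> [skip; split] <;>
          simp [List.getD, List.getElem?_set_ne (by omega : k ≠ i)]
      rw [hstep, hent i hi]
      by_cases hik2 : i < k
      · rw [if_pos hik2, if_pos (by omega)]
      · rw [if_neg hik2, if_neg (by omega)]

-- folding B's row step over all rows: entry i is the pvUpd-fold over the DIFF vectors
theorem pvRow_fold (d : Nat) (result : List (List (List Int))) :
    ∀ (st : List (Option Int) × List (List Int)),
      st.1.length = d → st.2.length = d →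
      ((result.foldl (pvRow d) st).1.length = d ∧
       (result.foldl (pvRow d) st).2.length = d) ∧
      ∀ i : Nat, i < d →
        (((result.foldl (pvRow d) st).1.getD i none,
          (result.foldl (pvRow d) st).2.getD i []) =
          (result.map pvVec).foldl (pvUpd (i : Int)) (st.1.getD i none, st.2.getD i [])) := by
  induction result with
  | nil => intro st h1 h2; simp [h1, h2]
  | cons res rest ih =>
    intro st h1 h2
    rw [List.foldl_cons]
    obtain ⟨⟨hl1, hl2⟩, hent⟩ := pvInner_foldRange (pvVec res) d d st h1 h2
    have hrow : pvRow d st res = (List.range d).foldl (pvInner (pvVec res)) st := rfl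
    obtain ⟨hlen, hrest⟩ := ih (pvRow d st res) (by rw [hrow]; exact hl1) (by rw [hrow]; exact hl2)
    refine ⟨hlen, ?_⟩
    intro i hi
    rw [hrest i hi, List.map_cons, List.foldl_cons]
    have := hent i hi
    rw [if_pos hi] at this
    rw [hrow, this]

-- A's result is the range-d fold appending singleton entries; turn it into a map
theorem pvFoldl_append_map {α β : Type} (f : α → β) (l : List α) :
    ∀ init : List β, l.foldl (fun db i => db ++ [f i]) init = init ++ l.map f := by
  induction l with
  | nil => simp
  | cons x xs ih => intro init; simp [ih]

-- ===== VERDICT (by name: the statement is the Claim_ definition above) =====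
theorem calculate_dominance_boundary_spec : Claim_equal_calculate_dominance_boundary := by
  intro c_val result _ _
  unfold Spec_calculate_dominance_boundary
  unfold calculate_dominance_boundary calculate_dominance_boundary_alt
  by_cases hres : result = []
  · simp [hres]
  · by_cases hcv : c_val = []
    · subst hcv
      rw [if_pos hres, if_pos (Or.inr rfl)]
      simp
    · rw [if_pos hres, if_neg (by simp [hres, hcv])]
      set d := c_val.length with hd
      obtain ⟨⟨hl1, hl2⟩, hent⟩ := pvRow_fold d result
        (List.replicate d none, List.replicate d [])
        (by simp) (by simp)
      rw [pvFoldl_append_map (fun i : Nat => pvEntryAFun result (i : Int)) (List.range d) []]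
      rw [List.nil_append]
      apply List.ext_getElem
      · simp only [List.length_map, List.length_range]
        exact hl2.symm
      · intro i hi1 hi2
        have hid : i < d := by simpa using hi1
        have hrows : result.map pvVec ≠ [] := by simpa using hres
        simp only [List.getElem_map, List.getElem_range]
        rw [pvEntryA (i : Int) result hres]
        have hBe := hent i hid
        simp only [List.getD_eq_getElem?_getD, List.getElem?_replicate, hid, if_true,
          Option.getD_some] at hBe
        rw [pvUpd_fold_none (i : Int) (result.map pvVec) hrows] at hBe
        have hsnd : (result.foldl (pvRow d) (List.replicate d none, List.replicate d [])).2.getD i []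
            = (pvFM (i : Int) (result.map pvVec)).2 := by
          have := congrArg Prod.snd hBe
          simpa using this
        rw [← hsnd]
        simp [List.getD_eq_getElem?_getD, List.getElem?_eq_getElem hi2]
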